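-- pv_equiv track=rewrite | github.com/Ahuiting/SSBI | Assignment07/A7.py | trypsin_digestion
-- ===== SOURCE A (Python) =====
-- def trypsin_digestion(sequence):
--     peptides = []
--     peptide = ""
--     previous_aa = ""
--
--     for aa in sequence:
--         if (aa == "K" or aa == "R") and previous_aa != "P":
--             peptides.append(peptide + aa)
--             peptide = ""
--         else:
--             peptide += aa
--         previous_aa = aa
--     if peptide:
--         peptides.append(peptide)
--     return peptides
-- ===== SOURCE B (Python) =====
-- def trypsin_digestion(sequence):
--     # Cut AFTER each K/R that is not preceded by a P; then slice between cuts.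
--     cuts = [i for i, aa in enumerate(sequence)
--             if (aa == "K" or aa == "R") and (i == 0 or sequence[i - 1] != "P")]
--     bounds = [0] + [i + 1 for i in cuts]
--     peptides = [sequence[s:e] for s, e in zip(bounds, bounds[1:])]
--     if bounds[-1] < len(sequence):
--         peptides.append(sequence[bounds[-1]:])
--     return peptides
-- ===== Notes on version B (the rewrite author's own statement) =====
-- stated objective: alternative
-- what changed: A accumulates the current peptide character by character while looping; B first collects all cut indices (K/R not preceded by P) in one comprehension and then builds the peptides by slicing the sequence between consecutive boundaries.
import Mathlib
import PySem

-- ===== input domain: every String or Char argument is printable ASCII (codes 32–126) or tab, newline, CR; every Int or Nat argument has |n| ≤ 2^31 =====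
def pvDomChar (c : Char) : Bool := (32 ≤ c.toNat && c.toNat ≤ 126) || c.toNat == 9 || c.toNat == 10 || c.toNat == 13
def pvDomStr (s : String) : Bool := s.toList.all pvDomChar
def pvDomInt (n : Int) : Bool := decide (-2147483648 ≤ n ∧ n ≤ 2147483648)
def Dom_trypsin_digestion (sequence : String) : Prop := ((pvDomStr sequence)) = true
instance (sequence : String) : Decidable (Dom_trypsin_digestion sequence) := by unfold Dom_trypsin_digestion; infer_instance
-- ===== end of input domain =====

-- B replaces A's accumulate-as-you-go loop by an index-table-then-slice decomposition
-- (collect the cut positions first, then slice between consecutive bounds); objective: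
-- alternative decomposition, same cost. Python strings are modelled as List Char (built
-- up exactly as the Python builds them) and converted with String.ofList at the end.

-- ===== PORT A =====
-- one loop step of A: state = (peptides, peptide, previous_aa); previous_aa is "" or a single char
def pvStepA (st : List (List Char) × List Char × List Char) (aa : Char) :
    List (List Char) × List Char × List Char :=
  if (aa == 'K' || aa == 'R') && st.2.2 != ['P'] then
    (st.1 ++ [st.2.1 ++ [aa]], [], [aa])
  else
    (st.1, st.2.1 ++ [aa], [aa])

def trypsin_digestion (sequence : String) : List String :=
  let st := sequence.toList.foldl pvStepA ([], [], [])
  (if st.2.1 ≠ [] then st.1 ++ [st.2.1] else st.1).map String.ofList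

-- ===== PORT B =====
-- B's cut condition: aa in (K, R) and (i == 0 or sequence[i-1] != "P")
def pvCond (s : List Char) (p : Int × Char) : Bool :=
  (p.2 == 'K' || p.2 == 'R') && (p.1 == 0 || PySem.List.pyGet? s (p.1 - 1) != some 'P')

-- cuts = [i for i, aa in enumerate(sequence) if …]
def pvCuts (s : List Char) : List Int :=
  ((PySem.List.enumerate s 0).filter (pvCond s)).map (·.1)

def trypsin_digestion_alt (sequence : String) : List String :=
  let s := sequence.toList
  let cuts := pvCuts s
  let bounds : List Int := 0 :: cuts.map (· + 1)
  let peptides := (bounds.zip bounds.tail).map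
      (fun p => String.ofList (PySem.List.slice s (some p.1) (some p.2)))
  let last := PySem.List.pyGetD bounds (-1) 0      -- bounds[-1]; bounds is never empty
  if last < PySem.List.len s then
    peptides ++ [String.ofList (PySem.List.slice s (some last) none)]
  else peptides

-- ===== PRECONDITION & SPEC =====
def Spec_trypsin_digestion (sequence : String) (out : List String) : Prop := out = trypsin_digestion_alt sequence
instance (sequence : String) (out : List String) : Decidable (Spec_trypsin_digestion sequence out) := by unfold Spec_trypsin_digestion; infer_instance

-- ===== CLAIM (what is proved, stated in full; the proofs are below) =====
def Claim_equal_trypsin_digestion : Prop := ∀ (sequence : String), Dom_trypsin_digestion sequence → Spec_trypsin_digestion sequence (trypsin_digestion sequence)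

-- ===== LEMMAS AND PROOFS =====

-- proof-side names for the pieces of B
def pvBounds (s : List Char) : List Int := 0 :: (pvCuts s).map (· + 1)
def pvPeps (s : List Char) : List (List Char) :=
  ((pvBounds s).zip (pvBounds s).tail).map (fun p => PySem.List.slice s (some p.1) (some p.2))
def pvLastB (s : List Char) : Int := PySem.List.pyGetD (pvBounds s) (-1) 0
def pvTail (s : List Char) : List Char := s.drop (pvLastB s).toNat
def pvPrev (s : List Char) : List Char :=
  match s.getLast? with | none => [] | some a => [a]
-- whether appending c to t creates a new cut at index t.length
def pvCutLast (t : List Char) (c : Char) : Bool :=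
  (c == 'K' || c == 'R') && (t.getLast? != some 'P')

theorem pvCuts_mem (s : List Char) (i : Int) (h : i ∈ pvCuts s) : 0 ≤ i ∧ i < s.length := by
  unfold pvCuts at h
  simp only [List.mem_map, List.mem_filter] at h
  obtain ⟨p, ⟨hp, _⟩, rfl⟩ := h
  rw [PySem.List.mem_enumerate_iff] at hp
  obtain ⟨k, hk, rfl⟩ := hp
  refine ⟨by simp, ?_⟩
  simp
  omega

theorem pvCuts_snoc (t : List Char) (c : Char) :
    pvCuts (t ++ [c]) = pvCuts t ++ (if pvCutLast t c then [(t.length : Int)] else []) := by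
  unfold pvCuts
  rw [PySem.List.enumerate_append, List.filter_append, List.map_append]
  congr 1
  · -- prefix part: the cut condition agrees on elements of enumerate t 0
    congr 1
    apply List.filter_congr
    intro p hp
    rw [PySem.List.mem_enumerate_iff] at hp
    obtain ⟨k, hk, rfl⟩ := hp
    by_cases hk0 : k = 0
    · subst hk0; simp [pvCond]
    · have h2 : (((0:Int) + (k:Int)) == 0) = false := by simpa using hk0
      have h1 : ((0:Int) + (k : Int) - 1) = ((k - 1 : Nat) : Int) := by omega
      simp only [pvCond, h2, h1, PySem.List.pyGet?_natCast, Bool.false_or]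
      rw [List.getElem?_append_left (by omega)]
  · -- the new last element
    simp only [zero_add, PySem.List.enumerate_cons, PySem.List.enumerate_nil]
    by_cases ht : t = []
    · subst ht
      by_cases hc : (c == 'K' || c == 'R') = true <;>
        simp [pvCond, pvCutLast, List.filter, hc]
    · have hpos : 0 < t.length := List.length_pos_iff.mpr ht
      have hlen : (((t.length : Int)) == 0) = false := by simp; omega
      have h1 : ((t.length : Int) - 1) = ((t.length - 1 : Nat) : Int) := by omega
      have h2 : (t ++ [c])[t.length - 1]? = t.getLast? := by
        rw [List.getElem?_append_left (by omega), List.getLast?_eq_getElem?]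
      simp only [pvCond, pvCutLast, List.filter, hlen, h1, PySem.List.pyGet?_natCast, h2,
        Bool.false_or]
      by_cases hc : (c == 'K' || c == 'R') = true <;>
        by_cases hp : (t.getLast? != some 'P') = true <;>
        simp [hc, hp]

theorem pairs_snoc (l : List Int) (a : Int) (h : l ≠ []) :
    (l ++ [a]).zip ((l ++ [a]).tail) = l.zip l.tail ++ [(l.getLast h, a)] := by
  induction l with
  | nil => exact absurd rfl h
  | cons x xs ih =>
    cases xs with
    | nil => simp
    | cons y ys =>
      simp only [List.cons_append, List.zip_cons_cons, List.tail_cons]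
      rw [show (x :: y :: ys).getLast h = (y :: ys).getLast (by simp) from List.getLast_cons _]
      simpa using ih (by simp)

theorem pvBounds_mem (s : List Char) (x : Int) (h : x ∈ pvBounds s) :
    0 ≤ x ∧ x ≤ (s.length : Int) := by
  unfold pvBounds at h
  rw [List.mem_cons] at h
  rcases h with rfl | h
  · exact ⟨le_refl 0, Int.natCast_nonneg _⟩
  · simp only [List.mem_map] at h
    obtain ⟨i, hi, rfl⟩ := h
    have := pvCuts_mem s i hi
    omega

theorem pvBounds_ne_nil (s : List Char) : pvBounds s ≠ [] := by simp [pvBounds]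

theorem pvLastB_eq_getLast (s : List Char) :
    pvLastB s = (pvBounds s).getLast (pvBounds_ne_nil s) := by
  unfold pvLastB
  rw [PySem.List.pyGetD_neg_one (pvBounds s) 0 (pvBounds_ne_nil s)]

theorem pvLastB_bounds (s : List Char) : 0 ≤ pvLastB s ∧ pvLastB s ≤ (s.length : Int) := by
  apply pvBounds_mem
  rw [pvLastB_eq_getLast]
  exact List.getLast_mem _

theorem slice_stable (t u : List Char) (a b : Int) (ha : 0 ≤ a) (hb : 0 ≤ b)
    (hal : a ≤ (t.length : Int)) (hbl : b ≤ (t.length : Int)) :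
    PySem.List.slice (t ++ u) (some a) (some b) = PySem.List.slice t (some a) (some b) := by
  rw [PySem.List.slice_toNat _ ha hb, PySem.List.slice_toNat _ ha hb,
    List.drop_append_of_le_length (by omega),
    List.take_append_of_le_length (by simp; omega)]

theorem pvPrev_ne (t : List Char) : (pvPrev t != ['P']) = (t.getLast? != some 'P') := by
  cases h : t.getLast? with
  | none => simp only [pvPrev, h]; rfl
  | some a =>
    simp only [pvPrev, h]
    by_cases ha : a = 'P'
    · subst ha; decide
    · have h1 : ([a] != ['P']) = true := by simp [ha]
      have h2 : (some a != some 'P') = true := by simp [ha]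
      rw [h1, h2]

theorem pvPrev_snoc (t : List Char) (c : Char) : pvPrev (t ++ [c]) = [c] := by
  simp [pvPrev]

theorem pvBounds_snoc (t : List Char) (c : Char) :
    pvBounds (t ++ [c]) = pvBounds t ++ (if pvCutLast t c then [(t.length : Int) + 1] else []) := by
  unfold pvBounds
  rw [pvCuts_snoc]
  by_cases h : pvCutLast t c = true <;> simp [h]

theorem mem_pairs (l : List Int) (p : Int × Int) (h : p ∈ l.zip l.tail) : p.1 ∈ l ∧ p.2 ∈ l :=
  ⟨(List.of_mem_zip h).1, (List.tail_sublist l).mem (List.of_mem_zip h).2⟩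

theorem peps_stable (t : List Char) (c : Char) :
    ((pvBounds t).zip (pvBounds t).tail).map
      (fun p => PySem.List.slice (t ++ [c]) (some p.1) (some p.2)) = pvPeps t := by
  unfold pvPeps
  apply List.map_congr_left
  intro p hp
  obtain ⟨h1, h2⟩ := mem_pairs _ p hp
  obtain ⟨h1a, h1b⟩ := pvBounds_mem t _ h1
  obtain ⟨h2a, h2b⟩ := pvBounds_mem t _ h2
  exact slice_stable t [c] p.1 p.2 h1a h2a h1b h2b

theorem pvLastB_snoc (t : List Char) (c : Char) :
    pvLastB (t ++ [c]) = if pvCutLast t c then (t.length : Int) + 1 else pvLastB t := by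
  rw [pvLastB_eq_getLast, pvLastB_eq_getLast]
  by_cases h : pvCutLast t c = true
  · simp [pvBounds_snoc, h]
  · simp [pvBounds_snoc, h]

theorem peps_snoc_cut (t : List Char) (c : Char) (h : pvCutLast t c = true) :
    pvPeps (t ++ [c]) = pvPeps t ++ [pvTail t ++ [c]] := by
  have hb := pvBounds_ne_nil t
  have hlb := pvLastB_bounds t
  unfold pvPeps
  rw [pvBounds_snoc, if_pos h, pairs_snoc _ _ hb, List.map_append]
  congr 1
  · exact peps_stable t c
  · simp only [List.map_cons, List.map_nil]
    congr 1
    rw [← pvLastB_eq_getLast]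
    rw [PySem.List.slice_toNat _ hlb.1 (by positivity)]
    rw [List.drop_append_of_le_length (by omega)]
    apply List.take_of_length_le
    simp
    omega

theorem tail_snoc_cut (t : List Char) (c : Char) (h : pvCutLast t c = true) :
    pvTail (t ++ [c]) = [] := by
  unfold pvTail
  rw [pvLastB_snoc, if_pos h]
  apply List.drop_of_length_le
  simp

theorem peps_snoc_nocut (t : List Char) (c : Char) (h : pvCutLast t c = false) :
    pvPeps (t ++ [c]) = pvPeps t := by
  unfold pvPeps
  conv_lhs => rw [pvBounds_snoc, if_neg (by simp [h]), List.append_nil]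
  exact peps_stable t c

theorem tail_snoc_nocut (t : List Char) (c : Char) (h : pvCutLast t c = false) :
    pvTail (t ++ [c]) = pvTail t ++ [c] := by
  have hlb := pvLastB_bounds t
  unfold pvTail
  rw [pvLastB_snoc, if_neg (by simp [h])]
  exact List.drop_append_of_le_length (by omega)

-- the loop invariant: A's fold state over s is exactly B's (peptides so far, trailing slice, last char)
theorem pvMain (s : List Char) :
    s.foldl pvStepA ([], [], []) = (pvPeps s, pvTail s, pvPrev s) := by
  induction s using List.reverseRecOn with
  | nil => decide
  | append_singleton t c ih =>
    rw [List.foldl_append, ih]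
    show pvStepA _ c = _
    unfold pvStepA
    simp only
    rw [pvPrev_ne]
    show (if pvCutLast t c then _ else _) = _
    by_cases h : pvCutLast t c = true
    · rw [if_pos h, peps_snoc_cut t c h, tail_snoc_cut t c h, pvPrev_snoc]
    · rw [if_neg (by simp [h]), peps_snoc_nocut t c (by simpa using h),
        tail_snoc_nocut t c (by simpa using h), pvPrev_snoc]

theorem pv_the_spec (seq : String) : trypsin_digestion seq = trypsin_digestion_alt seq := by
  have hlb := pvLastB_bounds seq.toList
  have hA : trypsin_digestion seq
      = (if pvTail seq.toList ≠ [] then pvPeps seq.toList ++ [pvTail seq.toList]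
          else pvPeps seq.toList).map String.ofList := by
    simp only [trypsin_digestion, pvMain]
  have hB : trypsin_digestion_alt seq
      = (if pvLastB seq.toList < PySem.List.len seq.toList then
          (pvPeps seq.toList).map String.ofList
            ++ [String.ofList (PySem.List.slice seq.toList (some (pvLastB seq.toList)) none)]
        else (pvPeps seq.toList).map String.ofList) := by
    simp only [trypsin_digestion_alt]
    simp [pvPeps, pvBounds, pvLastB, List.map_map, Function.comp_def]
  rw [hA, hB]
  have htail : PySem.List.slice seq.toList (some (pvLastB seq.toList)) none = pvTail seq.toList := by
    rw [PySem.List.slice_from _ hlb.1]; rfl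
  have hcond : (pvTail seq.toList ≠ []) ↔ (pvLastB seq.toList < PySem.List.len seq.toList) := by
    unfold pvTail
    rw [PySem.List.len_eq, ne_eq, List.drop_eq_nil_iff]
    omega
  by_cases h : pvTail seq.toList ≠ []
  · rw [if_pos h, if_pos (hcond.mp h), List.map_append, htail]
    rfl
  · rw [if_neg h, if_neg (fun hc => h (hcond.mpr hc))]

-- ===== VERDICT (by name: the statement is the Claim_ definition above) =====
theorem trypsin_digestion_spec : Claim_equal_trypsin_digestion := by
  intro seq _
  unfold Spec_trypsin_digestion
  exact pv_the_spec seq
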